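-- pv_equiv track=rewrite | github.com/SestrenExsis/CodeKatas | adventofcode/AdventOfCode2018.py | solve
-- ===== SOURCE A (Python) =====
-- def solve(magic_number):
--     C = 0
--     result = -1
--     while result == -1:
--         A = C | 65_536
--         C = magic_number
--         while True:
--             B = A & 255
--             C += B
--             C &= 16_777_215
--             C *= 65_899
--             C &= 16_777_215
--             if 256 > A:
--                 result = C
--                 break
--             else:
--                 A //= 256
--     return result
-- ===== SOURCE B (Python) =====
-- def solve(magic_number):
--     # Pass 1: extract the base-256 digits of A (which starts as 0 | 65536),
--     # mirroring the original's post-check stop condition 256 > A.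
--     A = 0 | 65_536
--     digits = []
--     while True:
--         digits.append(A & 255)
--         if 256 > A:
--             break
--         A //= 256
--     # Pass 2: fold the hash update over the digit list.
--     C = magic_number
--     for B in digits:
--         C = (((C + B) & 16_777_215) * 65_899) & 16_777_215
--     return C
-- ===== Notes on version B (the rewrite author's own statement) =====
-- stated objective: alternative
-- what changed: Splits A's single interleaved loop into two passes: first extract the base-256 digit list of A (stopping on the same 256 > A test), then fold the hash update over that list; the vestigial outer while loop (whose body always sets result on its first run) is dropped.
import Mathlib
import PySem

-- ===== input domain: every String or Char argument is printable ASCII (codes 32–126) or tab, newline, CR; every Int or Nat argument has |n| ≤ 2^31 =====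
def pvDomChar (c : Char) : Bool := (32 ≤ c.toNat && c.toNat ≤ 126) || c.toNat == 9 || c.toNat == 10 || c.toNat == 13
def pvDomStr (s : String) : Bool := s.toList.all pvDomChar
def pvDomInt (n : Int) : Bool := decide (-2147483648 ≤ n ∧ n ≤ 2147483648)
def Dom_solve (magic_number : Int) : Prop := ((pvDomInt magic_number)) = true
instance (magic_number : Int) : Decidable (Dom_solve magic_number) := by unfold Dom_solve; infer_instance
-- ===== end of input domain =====

-- B re-decomposes A's single interleaved loop into two passes (extract base-256 digits, then
-- fold the hash update) and drops the vestigial outer while loop; return values are identical.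

-- ===== PORT A =====
-- inner 'while True' loop of A, state (C, A); fuel A.toNat + 1 is exact since A is at least
-- divided by 256 per iteration (and a non-positive A exits immediately via '256 > A')
def solveInnerGo : Nat → Int → Int → Int
  | 0, C, _ => C
  | fuel + 1, C, A =>
    let B := PySem.Int.band A 255
    let C1 := PySem.Int.band (PySem.Int.band (C + B) 16777215 * 65899) 16777215
    if 256 > A then C1
    else solveInnerGo fuel C1 (PySem.Int.floordiv A 256)

def solveInner (C A : Int) : Int := solveInnerGo (A.toNat + 1) C A

-- outer 'while result == -1' loop of A, state (C, result); the body always sets result to a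
-- '& 0xFFFFFF' value (≥ 0 ≠ -1), so the loop exits after its first iteration and fuel 2 is exact
def solveOuterGo (magic_number : Int) : Nat → Int → Int → Int
  | 0, _, result => result
  | fuel + 1, C, result =>
    if result = -1 then
      let A := PySem.Int.bor C 65536
      let r := solveInner magic_number A
      solveOuterGo magic_number fuel r r
    else result

def solve (magic_number : Int) : Int := solveOuterGo magic_number 2 0 (-1)

-- ===== PORT B =====
-- pass 1 of B: the base-256 digit list, with the same '256 > A' stop test (same exact fuel)
def digitsGo : Nat → Int → List Int
  | 0, _ => []
  | fuel + 1, A =>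
    PySem.Int.band A 255 ::
      (if 256 > A then [] else digitsGo fuel (PySem.Int.floordiv A 256))

def digitsOf (A : Int) : List Int := digitsGo (A.toNat + 1) A

-- pass 2 of B: the hash update folded over the digits
def hashStep (C B : Int) : Int :=
  PySem.Int.band (PySem.Int.band (C + B) 16777215 * 65899) 16777215

def solve_alt (magic_number : Int) : Int :=
  (digitsOf (PySem.Int.bor 0 65536)).foldl hashStep magic_number

-- ===== PRECONDITION & SPEC =====
def Spec_solve (magic_number : Int) (out : Int) : Prop := out = solve_alt magic_number
instance (magic_number : Int) (out : Int) : Decidable (Spec_solve magic_number out) := by unfold Spec_solve; infer_instance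

-- ===== CLAIM (what is proved, stated in full; the proofs are below) =====
def Claim_equal_solve : Prop := ∀ (magic_number : Int), Dom_solve magic_number → Spec_solve magic_number (solve magic_number)

-- ===== LEMMAS AND PROOFS =====
theorem band_mask_nonneg (a : Int) : 0 ≤ PySem.Int.band a 16777215 := by
  unfold PySem.Int.band
  split_ifs <;> omega

theorem solveInnerGo_nonneg (fuel : Nat) (C A : Int) (hC : 0 ≤ C) :
    0 ≤ solveInnerGo fuel C A := by
  induction fuel generalizing C A with
  | zero => exact hC
  | succ f ih =>
      rw [solveInnerGo]
      split
      · exact band_mask_nonneg _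
      · exact ih _ _ (band_mask_nonneg _)

theorem solveInner_nonneg (C A : Int) : 0 ≤ solveInner C A := by
  rw [solveInner, solveInnerGo]
  split
  · exact band_mask_nonneg _
  · exact solveInnerGo_nonneg _ _ _ (band_mask_nonneg _)

theorem solveInnerGo_eq_fold (fuel : Nat) (C A : Int) :
    solveInnerGo fuel C A = (digitsGo fuel A).foldl hashStep C := by
  induction fuel generalizing C A with
  | zero => rfl
  | succ f ih =>
      rw [solveInnerGo, digitsGo]
      split
      · simp [hashStep]
      · simp only [List.foldl_cons]
        exact ih _ _

-- ===== VERDICT (by name: the statement is the Claim_ definition above) =====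
theorem solve_spec : Claim_equal_solve := by
  intro m _
  have h := solveInner_nonneg m (PySem.Int.bor 0 65536)
  unfold Spec_solve solve solve_alt
  rw [solveOuterGo, if_pos rfl]
  show solveOuterGo m 1 (solveInner m (PySem.Int.bor 0 65536)) (solveInner m (PySem.Int.bor 0 65536)) =
    List.foldl hashStep m (digitsOf (PySem.Int.bor 0 65536))
  rw [solveOuterGo, if_neg (by omega)]
  rw [solveInner, digitsOf]
  exact solveInnerGo_eq_fold _ _ _
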